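-- pv_equiv track=rewrite | github.com/DDMAL/text_alignment | textAlign.py | alignment_fitness
-- ===== SOURCE A (Python) =====
-- def alignment_fitness(alignment, group_lengths, syl_lengths):
--     '''
--     given an alignment between text blobs on the manuscript and syllables of the transcript,
--     computes the error of the alignment based on the estimated syllable lengths and the known
--     lengths present in the original image.
--     '''
--     cur_pos = 0
--     cost = 0
--     for i, x in enumerate(alignment):
--         new_sum = sum(syl_lengths[cur_pos:cur_pos + x])
--         cur_pos += x
--         cost += abs(new_sum - group_lengths[i]) ** 2
--
--     return round(cost / len(alignment))
-- ===== SOURCE B (Python) =====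
-- def alignment_fitness(alignment, group_lengths, syl_lengths):
--     '''
--     Squared-error fitness of a text/syllable alignment, computed with a
--     prefix-sum table: each group's syllable-length sum is a difference of two
--     prefix sums (capped at the table's end), built once instead of slicing and
--     summing syl_lengths for every alignment entry.
--     '''
--     N = len(syl_lengths)
--     prefix = [0]
--     for v in syl_lengths:
--         prefix.append(prefix[-1] + v)
--     cost = 0
--     pos = 0
--     for x, g in zip(alignment, group_lengths):
--         s = prefix[min(pos + x, N)] - prefix[min(pos, N)]
--         pos += x
--         cost += (s - g) ** 2
--     return round(cost / len(alignment))
-- ===== Notes on version B (the rewrite author's own statement) =====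
-- stated objective: alternative
-- what changed: B precomputes a prefix-sum table of syl_lengths once and obtains each group's syllable sum as a difference of two prefix sums instead of re-slicing and re-summing syl_lengths per alignment entry; Pre_ restricts to nonnegative alignment entries (syllable counts), excluding inputs where A raises (empty alignment, alignment longer than group_lengths) and alignments with negative entries, where A's value is an artefact of Python's negative slice indices.
-- outside the precondition, e.g. on alignment_fitness([-1], [2], [1, 2, 3]): A returns 1, B returns 16
import Mathlib
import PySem

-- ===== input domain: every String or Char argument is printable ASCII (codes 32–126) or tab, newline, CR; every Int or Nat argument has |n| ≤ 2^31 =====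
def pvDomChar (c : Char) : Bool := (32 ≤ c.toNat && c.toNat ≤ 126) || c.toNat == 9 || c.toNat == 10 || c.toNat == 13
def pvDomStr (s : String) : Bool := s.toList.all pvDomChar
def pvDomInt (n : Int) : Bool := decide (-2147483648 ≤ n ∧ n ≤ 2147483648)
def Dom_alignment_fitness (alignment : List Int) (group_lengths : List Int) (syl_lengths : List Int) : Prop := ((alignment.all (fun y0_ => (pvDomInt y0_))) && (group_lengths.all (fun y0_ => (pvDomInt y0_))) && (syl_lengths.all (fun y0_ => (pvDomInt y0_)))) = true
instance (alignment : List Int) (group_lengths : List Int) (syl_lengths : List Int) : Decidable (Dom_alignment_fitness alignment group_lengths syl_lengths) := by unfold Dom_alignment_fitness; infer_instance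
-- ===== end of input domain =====

-- B replaces A's per-entry slice-and-sum of syl_lengths by a prefix-sum table built once,
-- reading each group's syllable sum as a difference of two prefix sums (objective: alternative).

-- `round(cost/n)` in Python divides two ints as IEEE doubles and rounds half-to-even.
-- The helpers below compute that value EXACTLY over the integers (for 0 ≤ a, 0 < b,
-- within the double's exponent range): first the correctly rounded 53-bit significand
-- of a/b, then half-even rounding of that double to an integer. Shared by both ports,
-- since both Pythons end with the same `round(cost / len(alignment))`.

-- nearest integer to num/den, ties to even (exact for 0 ≤ num, 0 < den)
def pvHalfEvenDiv (num den : Int) : Int :=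
  let q := num / den
  let r := num % den
  if 2 * r > den ∨ (2 * r = den ∧ q % 2 = 1) then q + 1 else q

-- decide b * 2^e ≤ a with an integer exponent e
def pvScaleLe (b : Int) (e : Int) (a : Int) : Bool :=
  if 0 ≤ e then b * 2 ^ e.toNat ≤ a else b ≤ a * 2 ^ (-e).toNat

-- the e with b*2^e ≤ a < b*2^(e+1) (for 0 < a, 0 < b)
def pvLog2 (a b : Int) : Int :=
  let e0 : Int := (Nat.log2 a.toNat : Int) - (Nat.log2 b.toNat : Int)
  if pvScaleLe b e0 a then e0 else e0 - 1

-- Python round(a/b) for 0 ≤ a, 0 < b: double-round through the 53-bit significand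
def pvRoundDiv (a b : Int) : Int :=
  if a = 0 then 0
  else
    let e := pvLog2 a b
    if 52 ≤ e then
      pvHalfEvenDiv a (b * 2 ^ (e - 52).toNat) * 2 ^ (e - 52).toNat
    else
      pvHalfEvenDiv (pvHalfEvenDiv (a * 2 ^ (52 - e).toNat) b) (2 ^ (52 - e).toNat)

-- ===== PORT A =====
def alignment_fitness (alignment : List Int) (group_lengths : List Int) (syl_lengths : List Int) : Int :=
  let st := (PySem.List.enumerate alignment).foldl
    (fun (st : Int × Int) (ix : Int × Int) =>
      let new_sum := (PySem.List.slice syl_lengths (some st.1) (some (st.1 + ix.2))).sum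
      (st.1 + ix.2, st.2 + |new_sum - PySem.List.pyGetD group_lengths ix.1 0| ^ 2))
    (0, 0)
  pvRoundDiv st.2 (alignment.length : Int)

-- ===== PORT B =====
def alignment_fitness_alt (alignment : List Int) (group_lengths : List Int) (syl_lengths : List Int) : Int :=
  let N : Int := (syl_lengths.length : Int)
  let pref := syl_lengths.foldl
    (fun (pr : List Int) v => pr ++ [PySem.List.pyGetD pr (-1) 0 + v]) [0]
  let st := (alignment.zip group_lengths).foldl
    (fun (st : Int × Int) (xg : Int × Int) =>
      let s := PySem.List.pyGetD pref (min (st.1 + xg.1) N) 0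
               - PySem.List.pyGetD pref (min st.1 N) 0
      (st.1 + xg.1, st.2 + (s - xg.2) ^ 2))
    (0, 0)
  pvRoundDiv st.2 (alignment.length : Int)

-- ===== PRECONDITION & SPEC =====
-- Pre_ excludes the inputs where A raises — empty alignment (ZeroDivisionError in
-- round(cost/len)) and alignment longer than group_lengths (IndexError on group_lengths[i]) —
-- and alignments containing a negative entry: a syllable count cannot be negative, so such
-- inputs are outside the function's natural domain (A's value there is an artefact of
-- Python's negative slice indices).
def Pre_alignment_fitness (alignment : List Int) (group_lengths : List Int) (syl_lengths : List Int) : Prop :=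
  alignment ≠ [] ∧ alignment.length ≤ group_lengths.length ∧ ∀ x ∈ alignment, 0 ≤ x
instance (alignment : List Int) (group_lengths : List Int) (syl_lengths : List Int) : Decidable (Pre_alignment_fitness alignment group_lengths syl_lengths) := by unfold Pre_alignment_fitness; infer_instance

def pvWitness_alignment_fitness : List Int × List Int × List Int := ([1, 2], [3, 4], [1, 1, 1])

def Spec_alignment_fitness (alignment : List Int) (group_lengths : List Int) (syl_lengths : List Int) (out : Int) : Prop := out = alignment_fitness_alt alignment group_lengths syl_lengths
instance (alignment : List Int) (group_lengths : List Int) (syl_lengths : List Int) (out : Int) : Decidable (Spec_alignment_fitness alignment group_lengths syl_lengths out) := by unfold Spec_alignment_fitness; infer_instance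

-- ===== CLAIM (what is proved, stated in full; the proofs are below) =====
def Claim_equal_alignment_fitness : Prop := ∀ (alignment : List Int) (group_lengths : List Int) (syl_lengths : List Int), Dom_alignment_fitness alignment group_lengths syl_lengths → Pre_alignment_fitness alignment group_lengths syl_lengths → Spec_alignment_fitness alignment group_lengths syl_lengths (alignment_fitness alignment group_lengths syl_lengths)

-- ===== LEMMAS AND PROOFS =====

-- running partial sums of l starting from accumulator t
def pvPsums (t : Int) : List Int → List Int
  | [] => []
  | v :: tl => (t + v) :: pvPsums (t + v) tl

theorem pvFoldlPrefix : ∀ (l : List Int) (pr : List Int) (t : Int),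
    (l.foldl (fun (pr : List Int) v => pr ++ [PySem.List.pyGetD pr (-1) 0 + v]) (pr ++ [t]))
      = (pr ++ [t]) ++ pvPsums t l := by
  intro l
  induction l with
  | nil => intro pr t; simp [pvPsums]
  | cons v tl ih =>
      intro pr t
      simp only [List.foldl_cons, PySem.List.pyGetD_neg_one_append_singleton, pvPsums]
      have h : pr ++ [t] ++ [t + v] = (pr ++ [t]) ++ [t + v] := by simp
      rw [h, ih (pr ++ [t]) (t + v)]
      simp

theorem pvPsumsGetD : ∀ (l : List Int) (t : Int) (k : Nat), k < l.length →
    (pvPsums t l).getD k 0 = t + (l.take (k + 1)).sum := by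
  intro l
  induction l with
  | nil => intro t k h; simp at h
  | cons v tl ih =>
      intro t k h
      cases k with
      | zero => simp [pvPsums]
      | succ k =>
          simp only [pvPsums, List.getD_cons_succ, List.take_succ_cons, List.sum_cons]
          rw [ih (t + v) k (by simpa using h)]
          ring

theorem pvPrefixGetD (l : List Int) (k : Nat) (h : k ≤ l.length) :
    (((0 : Int) :: pvPsums 0 l)).getD k 0 = (l.take k).sum := by
  cases k with
  | zero => simp
  | succ k =>
      simp only [List.getD_cons_succ]
      rw [pvPsumsGetD l 0 k (by omega)]
      simp

theorem pvSliceSum (l : List Int) (a b : Int) :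
    (PySem.List.slice l (some a) (some b)).sum =
      (l.take (PySem.List.clampIdx l.length b)).sum
        - (l.take (min (PySem.List.clampIdx l.length a) (PySem.List.clampIdx l.length b))).sum := by
  simp only [PySem.List.slice]
  set lo := PySem.List.clampIdx l.length a with hlo
  set hi := PySem.List.clampIdx l.length b with hhi
  by_cases h : lo ≤ hi
  · have hmin : min lo hi = lo := by omega
    rw [hmin]
    have hsplit : l.take hi = l.take lo ++ (l.drop lo).take (hi - lo) := by
      have h2 : hi = lo + (hi - lo) := by omega
      rw [h2, List.take_add]
      simp
    rw [hsplit, List.sum_append]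
    ring
  · have hmin : min lo hi = hi := by omega
    rw [hmin]
    have : hi - lo = 0 := by omega
    simp [this]

theorem pvClampIdx_le (n : Nat) (i : Int) : PySem.List.clampIdx n i ≤ n := by
  simp only [PySem.List.clampIdx]
  split_ifs <;> omega

-- for a nonnegative bound, Python's clamp is just `min`
theorem pvClampIdx_nonneg (n : Nat) (i : Int) (h : 0 ≤ i) :
    ((PySem.List.clampIdx n i : Nat) : Int) = min i (n : Int) := by
  simp only [PySem.List.clampIdx]
  split_ifs <;> omega

-- the two loops run in lockstep: same positions, same costs
theorem pvLockstep (gl sl : List Int) :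
    ∀ (al : List Int) (start : Nat) (pos cost : Int),
    al.length + start ≤ gl.length → 0 ≤ pos → (∀ x ∈ al, 0 ≤ x) →
    (PySem.List.enumerate al (start : Int)).foldl
      (fun (st : Int × Int) (ix : Int × Int) =>
        let new_sum := (PySem.List.slice sl (some st.1) (some (st.1 + ix.2))).sum
        (st.1 + ix.2, st.2 + |new_sum - PySem.List.pyGetD gl ix.1 0| ^ 2))
      (pos, cost)
    = (al.zip (gl.drop start)).foldl
      (fun (st : Int × Int) (xg : Int × Int) =>
        let s := PySem.List.pyGetD ((0 : Int) :: pvPsums 0 sl) (min (st.1 + xg.1) (sl.length : Int)) 0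
                 - PySem.List.pyGetD ((0 : Int) :: pvPsums 0 sl) (min st.1 (sl.length : Int)) 0
        (st.1 + xg.1, st.2 + (s - xg.2) ^ 2))
      (pos, cost) := by
  intro al
  induction al with
  | nil => intro start pos cost h hpos hall; simp [PySem.List.enumerate]
  | cons x tl ih =>
      intro start pos cost h hpos hall
      have hx : 0 ≤ x := hall x (by simp)
      have hstart : start < gl.length := by simp at h; omega
      have hdrop : gl.drop start = gl[start] :: gl.drop (start + 1) :=
        List.drop_eq_getElem_cons hstart
      rw [hdrop]
      simp only [PySem.List.enumerate, List.zip_cons_cons, List.foldl_cons]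
      have hg : PySem.List.pyGetD gl (start : Int) 0 = gl[start] := by
        rw [PySem.List.pyGetD_natCast]
        exact List.getD_eq_getElem gl 0 hstart
      -- names for the prefix list and the two clamped indices
      set pre : List Int := (0 : Int) :: pvPsums 0 sl with hpre
      have hgetD : ∀ (i : Int), 0 ≤ i →
          PySem.List.pyGetD pre (min i (sl.length : Int)) 0
            = (sl.take (PySem.List.clampIdx sl.length i)).sum := by
        intro i hi
        have hcl := pvClampIdx_nonneg sl.length i hi
        have : min i (sl.length : Int) = ((PySem.List.clampIdx sl.length i : Nat) : Int) := by omega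
        rw [this, PySem.List.pyGetD_natCast]
        exact pvPrefixGetD sl _ (pvClampIdx_le sl.length i)
      have hmono : PySem.List.clampIdx sl.length pos ≤ PySem.List.clampIdx sl.length (pos + x) := by
        have h1 := pvClampIdx_nonneg sl.length pos hpos
        have h2 := pvClampIdx_nonneg sl.length (pos + x) (by omega)
        omega
      have hstep :
          (pos + x,
            cost + |(PySem.List.slice sl (some pos) (some (pos + x))).sum
                    - PySem.List.pyGetD gl (start : Int) 0| ^ 2)
          = (pos + x,
             cost + ((PySem.List.pyGetD pre (min (pos + x) (sl.length : Int)) 0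
                      - PySem.List.pyGetD pre (min pos (sl.length : Int)) 0 - gl[start]) ^ 2)) := by
        rw [hg, pvSliceSum, hgetD pos hpos, hgetD (pos + x) (by omega)]
        have hmin : min (PySem.List.clampIdx sl.length pos)
            (PySem.List.clampIdx sl.length (pos + x)) = PySem.List.clampIdx sl.length pos := by
          omega
        rw [hmin, sq_abs]
      rw [hstep]
      have hcast : ((start : Int) + 1) = ((start + 1 : Nat) : Int) := by push_cast; ring
      rw [hcast]
      exact ih (start + 1) _ _ (by simp at h ⊢; omega) (by omega)
        (fun y hy => hall y (by simp [hy]))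

-- ===== VERDICT (by name: the statement is the Claim_ definition above) =====
theorem alignment_fitness_spec : Claim_equal_alignment_fitness := by
  intro al gl sl _hdom hpre
  obtain ⟨hne, hlen, hnn⟩ := hpre
  unfold Spec_alignment_fitness alignment_fitness alignment_fitness_alt
  dsimp only
  have hpr : (sl.foldl (fun (pr : List Int) v => pr ++ [PySem.List.pyGetD pr (-1) 0 + v]) [0])
      = (0 : Int) :: pvPsums 0 sl := by
    have := pvFoldlPrefix sl [] 0
    simpa using this
  simp only [hpr]
  have := pvLockstep gl sl al 0 0 0 (by omega) le_rfl hnn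
  simp only [List.drop_zero, Nat.cast_zero] at this
  rw [this]
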